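-- pv_equiv track=rewrite | github.com/DylanKaing/relevant-priors-api | app.py | are_parts_related
-- ===== SOURCE A (Python) =====
-- RELATED_PARTS = {
--     ("brain", "head"), ("head", "brain"),
--     ("wrist", "hand"), ("hand", "wrist"),
--     ("abdomen", "pelvis"), ("pelvis", "abdomen"),
--     ("kidney", "abdomen"), ("abdomen", "kidney"),
--     ("pelvis", "bladder"), ("bladder", "pelvis"),
--     ("abdomen", "bladder"), ("bladder", "abdomen"),
--     ("lower_extremity", "knee"), ("lower_extremity", "ankle"),
--     ("lower_extremity", "foot"), ("lower_extremity", "thigh"),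
--     ("lower_extremity", "lower_leg"),
--     ("knee", "lower_extremity"), ("ankle", "lower_extremity"),
--     ("foot", "lower_extremity"), ("thigh", "lower_extremity"),
--     ("lower_leg", "lower_extremity"),
--     ("spine", "cervical_spine"), ("spine", "thoracic_spine"), ("spine", "lumbar_spine"),
--     ("cervical_spine", "spine"), ("thoracic_spine", "spine"), ("lumbar_spine", "spine"),
--     ("ankle", "foot"), ("foot", "ankle"),
--     ("cervical_spine", "neck"), ("neck", "cervical_spine"),
--     # Heart/ECHO is relevant to chest
--     ("heart", "chest"), ("chest", "heart"),
--     # Carotid relates to brain (vascular supply)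
--     ("carotid", "brain"), ("brain", "carotid"),
--     ("carotid", "head"), ("head", "carotid"),
--     # Cervical spine and head/brain
--     ("cervical_spine", "brain"), ("brain", "cervical_spine"),
--     ("cervical_spine", "head"), ("head", "cervical_spine"),
-- }
--
-- def are_parts_related(parts1: set, parts2: set) -> bool:
--     if parts1 & parts2:
--         return True
--     for p1 in parts1:
--         for p2 in parts2:
--             if (p1, p2) in RELATED_PARTS:
--                 return True
--     return False
-- ===== SOURCE B (Python) =====
-- # Alternative re-implementation: precomputed adjacency dict; build the set reachable
-- # from parts1 (itself plus neighbors) once, then a single disjointness test.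
-- _ADJ = {
--     "brain": {"head", "carotid", "cervical_spine"},
--     "head": {"brain", "carotid", "cervical_spine"},
--     "wrist": {"hand"},
--     "hand": {"wrist"},
--     "abdomen": {"pelvis", "kidney", "bladder"},
--     "pelvis": {"abdomen", "bladder"},
--     "kidney": {"abdomen"},
--     "bladder": {"pelvis", "abdomen"},
--     "lower_extremity": {"knee", "ankle", "foot", "thigh", "lower_leg"},
--     "knee": {"lower_extremity"},
--     "ankle": {"lower_extremity", "foot"},
--     "foot": {"lower_extremity", "ankle"},
--     "thigh": {"lower_extremity"},
--     "lower_leg": {"lower_extremity"},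
--     "spine": {"cervical_spine", "thoracic_spine", "lumbar_spine"},
--     "cervical_spine": {"spine", "neck", "brain", "head"},
--     "thoracic_spine": {"spine"},
--     "lumbar_spine": {"spine"},
--     "neck": {"cervical_spine"},
--     "heart": {"chest"},
--     "chest": {"heart"},
--     "carotid": {"brain", "head"},
-- }
--
-- def are_parts_related(parts1: set, parts2: set) -> bool:
--     reach = set(parts1)
--     for p in parts1:
--         reach |= _ADJ.get(p, set())
--     return not reach.isdisjoint(parts2)
-- ===== Notes on version B (the rewrite author's own statement) =====
-- stated objective: alternative
-- what changed: Replaces the nested pairwise scan over all (p1,p2) pairs against the flat pair set with a precomputed adjacency dict: B builds the reachable set (parts1 plus the neighbors of its elements) in one pass and finishes with a single disjointness test against parts2.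
import Mathlib
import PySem

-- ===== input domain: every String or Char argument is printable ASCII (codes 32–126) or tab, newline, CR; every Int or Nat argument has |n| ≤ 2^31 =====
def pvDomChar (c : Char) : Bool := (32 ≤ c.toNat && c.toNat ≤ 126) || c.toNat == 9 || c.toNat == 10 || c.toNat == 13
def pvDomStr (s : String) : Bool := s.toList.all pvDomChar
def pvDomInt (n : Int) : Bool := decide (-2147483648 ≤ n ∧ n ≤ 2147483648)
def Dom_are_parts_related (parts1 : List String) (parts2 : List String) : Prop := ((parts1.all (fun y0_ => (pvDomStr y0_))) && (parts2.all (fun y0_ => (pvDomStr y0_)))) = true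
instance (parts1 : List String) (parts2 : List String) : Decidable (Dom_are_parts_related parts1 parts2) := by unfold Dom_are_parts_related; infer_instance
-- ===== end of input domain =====

-- B replaces A's nested pairwise scan with a precomputed adjacency map and a single
-- reachable-set disjointness test (objective: alternative).

-- ===== PORT A =====
-- the module constant RELATED_PARTS (a set of pairs; only membership is tested)
def RELATED_PARTS : List (String × String) := [("brain", "head"), ("head", "brain"), ("wrist", "hand"), ("hand", "wrist"), ("abdomen", "pelvis"), ("pelvis", "abdomen"), ("kidney", "abdomen"), ("abdomen", "kidney"), ("pelvis", "bladder"), ("bladder", "pelvis"), ("abdomen", "bladder"), ("bladder", "abdomen"), ("lower_extremity", "knee"), ("lower_extremity", "ankle"), ("lower_extremity", "foot"), ("lower_extremity", "thigh"), ("lower_extremity", "lower_leg"), ("knee", "lower_extremity"), ("ankle", "lower_extremity"), ("foot", "lower_extremity"), ("thigh", "lower_extremity"), ("lower_leg", "lower_extremity"), ("spine", "cervical_spine"), ("spine", "thoracic_spine"), ("spine", "lumbar_spine"), ("cervical_spine", "spine"), ("thoracic_spine", "spine"), ("lumbar_spine", "spine"), ("ankle", "foot"), ("foot", "ankle"), ("cervical_spine",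 "neck"), ("neck", "cervical_spine"), ("heart", "chest"), ("chest", "heart"), ("carotid", "brain"), ("brain", "carotid"), ("carotid", "head"), ("head", "carotid"), ("cervical_spine", "brain"), ("brain", "cervical_spine"), ("cervical_spine", "head"), ("head", "cervical_spine")]

-- 'if parts1 & parts2: return True' then the nested for-loops with early return
def are_parts_related (parts1 : List String) (parts2 : List String) : Bool :=
  if parts1.any (fun p => parts2.contains p) then true
  else parts1.any (fun p1 => parts2.any (fun p2 => RELATED_PARTS.contains (p1, p2)))

-- ===== PORT B =====
-- the precomputed adjacency dict _ADJ (association list; only .get is used)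
def ADJ : List (String × List String) := [("brain", ["head", "carotid", "cervical_spine"]), ("head", ["brain", "carotid", "cervical_spine"]), ("wrist", ["hand"]), ("hand", ["wrist"]), ("abdomen", ["pelvis", "kidney", "bladder"]), ("pelvis", ["abdomen", "bladder"]), ("kidney", ["abdomen"]), ("bladder", ["pelvis", "abdomen"]), ("lower_extremity", ["knee", "ankle", "foot", "thigh", "lower_leg"]), ("knee", ["lower_extremity"]), ("ankle", ["lower_extremity", "foot"]), ("foot", ["lower_extremity", "ankle"]), ("thigh", ["lower_extremity"]), ("lower_leg", ["lower_extremity"]), ("spine", ["cervical_spine", "thoracic_spine", "lumbar_spine"]), ("cervical_spine", ["spine", "neck", "brain", "head"]), ("thoracic_spine", ["spine"]), ("lumbar_spine", ["spine"]), ("neck", ["cervical_spine"]), ("heart", ["chest"]), ("chest", ["heart"]), ("carotid", ["brain", "head"])]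

-- _ADJ.get(p, set())
def nbrs (p : String) : List String := (ADJ.lookup p).getD []

-- reach = parts1 ∪ (⋃ neighbors); 'not reach.isdisjoint(parts2)' — membership-equivalent
-- list of the reachable set (duplicates do not affect the disjointness test)
def are_parts_related_alt (parts1 : List String) (parts2 : List String) : Bool :=
  let reach := parts1 ++ parts1.flatMap nbrs
  parts2.any (fun q => reach.contains q)

-- ===== PRECONDITION & SPEC =====
def Spec_are_parts_related (parts1 : List String) (parts2 : List String) (out : Bool) : Prop := out = are_parts_related_alt parts1 parts2
instance (parts1 : List String) (parts2 : List String) (out : Bool) : Decidable (Spec_are_parts_related parts1 parts2 out) := by unfold Spec_are_parts_related; infer_instance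

-- ===== CLAIM (what is proved, stated in full; the proofs are below) =====
def Claim_equal_are_parts_related : Prop := ∀ (parts1 : List String) (parts2 : List String), Dom_are_parts_related parts1 parts2 → Spec_are_parts_related parts1 parts2 (are_parts_related parts1 parts2)

-- ===== LEMMAS AND PROOFS =====

-- the pair set and the adjacency map agree: (p1,p2) is a related pair iff p2 is a neighbor of p1
theorem mem_RELATED_iff_nbrs (p1 p2 : String) :
    (p1, p2) ∈ RELATED_PARTS ↔ p2 ∈ nbrs p1 := by
  rcases eq_or_ne p1 "brain" with rfl | h1
  · simp [RELATED_PARTS, nbrs, ADJ]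
    try tauto
  rcases eq_or_ne p1 "head" with rfl | h2
  · simp [RELATED_PARTS, nbrs, ADJ, List.lookup]
    try tauto
  rcases eq_or_ne p1 "wrist" with rfl | h3
  · simp [RELATED_PARTS, nbrs, ADJ, List.lookup]
  rcases eq_or_ne p1 "hand" with rfl | h4
  · simp [RELATED_PARTS, nbrs, ADJ, List.lookup]
  rcases eq_or_ne p1 "abdomen" with rfl | h5
  · simp [RELATED_PARTS, nbrs, ADJ, List.lookup]
    try tauto
  rcases eq_or_ne p1 "pelvis" with rfl | h6
  · simp [RELATED_PARTS, nbrs, ADJ, List.lookup]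
    try tauto
  rcases eq_or_ne p1 "kidney" with rfl | h7
  · simp [RELATED_PARTS, nbrs, ADJ, List.lookup]
  rcases eq_or_ne p1 "bladder" with rfl | h8
  · simp [RELATED_PARTS, nbrs, ADJ, List.lookup]
    try tauto
  rcases eq_or_ne p1 "lower_extremity" with rfl | h9
  · simp [RELATED_PARTS, nbrs, ADJ, List.lookup]
    try tauto
  rcases eq_or_ne p1 "knee" with rfl | h10
  · simp [RELATED_PARTS, nbrs, ADJ, List.lookup]
  rcases eq_or_ne p1 "ankle" with rfl | h11
  · simp [RELATED_PARTS, nbrs, ADJ, List.lookup]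
    try tauto
  rcases eq_or_ne p1 "foot" with rfl | h12
  · simp [RELATED_PARTS, nbrs, ADJ, List.lookup]
    try tauto
  rcases eq_or_ne p1 "thigh" with rfl | h13
  · simp [RELATED_PARTS, nbrs, ADJ, List.lookup]
  rcases eq_or_ne p1 "lower_leg" with rfl | h14
  · simp [RELATED_PARTS, nbrs, ADJ, List.lookup]
  rcases eq_or_ne p1 "spine" with rfl | h15
  · simp [RELATED_PARTS, nbrs, ADJ, List.lookup]
    try tauto
  rcases eq_or_ne p1 "cervical_spine" with rfl | h16
  · simp [RELATED_PARTS, nbrs, ADJ, List.lookup]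
    try tauto
  rcases eq_or_ne p1 "thoracic_spine" with rfl | h17
  · simp [RELATED_PARTS, nbrs, ADJ, List.lookup]
  rcases eq_or_ne p1 "lumbar_spine" with rfl | h18
  · simp [RELATED_PARTS, nbrs, ADJ, List.lookup]
  rcases eq_or_ne p1 "neck" with rfl | h19
  · simp [RELATED_PARTS, nbrs, ADJ, List.lookup]
  rcases eq_or_ne p1 "heart" with rfl | h20
  · simp [RELATED_PARTS, nbrs, ADJ, List.lookup]
  rcases eq_or_ne p1 "chest" with rfl | h21
  · simp [RELATED_PARTS, nbrs, ADJ, List.lookup]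
  rcases eq_or_ne p1 "carotid" with rfl | h22
  · simp [RELATED_PARTS, nbrs, ADJ, List.lookup]
    try tauto
  · have e1 : (p1 == "brain") = false := beq_eq_false_iff_ne.mpr h1
    have e2 : (p1 == "head") = false := beq_eq_false_iff_ne.mpr h2
    have e3 : (p1 == "wrist") = false := beq_eq_false_iff_ne.mpr h3
    have e4 : (p1 == "hand") = false := beq_eq_false_iff_ne.mpr h4
    have e5 : (p1 == "abdomen") = false := beq_eq_false_iff_ne.mpr h5
    have e6 : (p1 == "pelvis") = false := beq_eq_false_iff_ne.mpr h6
    have e7 : (p1 == "kidney") = false := beq_eq_false_iff_ne.mpr h7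
    have e8 : (p1 == "bladder") = false := beq_eq_false_iff_ne.mpr h8
    have e9 : (p1 == "lower_extremity") = false := beq_eq_false_iff_ne.mpr h9
    have e10 : (p1 == "knee") = false := beq_eq_false_iff_ne.mpr h10
    have e11 : (p1 == "ankle") = false := beq_eq_false_iff_ne.mpr h11
    have e12 : (p1 == "foot") = false := beq_eq_false_iff_ne.mpr h12
    have e13 : (p1 == "thigh") = false := beq_eq_false_iff_ne.mpr h13
    have e14 : (p1 == "lower_leg") = false := beq_eq_false_iff_ne.mpr h14
    have e15 : (p1 == "spine") = false := beq_eq_false_iff_ne.mpr h15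
    have e16 : (p1 == "cervical_spine") = false := beq_eq_false_iff_ne.mpr h16
    have e17 : (p1 == "thoracic_spine") = false := beq_eq_false_iff_ne.mpr h17
    have e18 : (p1 == "lumbar_spine") = false := beq_eq_false_iff_ne.mpr h18
    have e19 : (p1 == "neck") = false := beq_eq_false_iff_ne.mpr h19
    have e20 : (p1 == "heart") = false := beq_eq_false_iff_ne.mpr h20
    have e21 : (p1 == "chest") = false := beq_eq_false_iff_ne.mpr h21
    have e22 : (p1 == "carotid") = false := beq_eq_false_iff_ne.mpr h22
    simp [RELATED_PARTS, nbrs, ADJ, List.lookup, h1, h2, h3, h4, h5, h6, h7, h8, h9, h10, h11, h12, h13, h14, h15, h16, h17, h18, h19, h20, h21, h22, e1, e2, e3, e4, e5, e6, e7, e8, e9, e10, e11, e12, e13, e14, e15, e16, e17, e18, e19, e20, e21, e22]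

theorem ports_agree (parts1 parts2 : List String) :
    are_parts_related parts1 parts2 = are_parts_related_alt parts1 parts2 := by
  rw [Bool.eq_iff_iff]
  simp only [are_parts_related, are_parts_related_alt, Bool.if_true_left,
    Bool.or_eq_true, List.any_eq_true, List.contains_eq_mem, decide_eq_true_eq,
    List.mem_append, List.mem_flatMap, mem_RELATED_iff_nbrs]
  constructor
  · rintro (⟨p, hp1, hp2⟩ | ⟨p1, hp1, p2, hp2, hrel⟩)
    · exact ⟨p, hp2, Or.inl hp1⟩
    · exact ⟨p2, hp2, Or.inr ⟨p1, hp1, hrel⟩⟩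
  · rintro ⟨q, hq2, hq1 | ⟨p, hp1, hrel⟩⟩
    · exact Or.inl ⟨q, hq1, hq2⟩
    · exact Or.inr ⟨p, hp1, q, hq2, hrel⟩

-- ===== VERDICT (by name: the statement is the Claim_ definition above) =====
theorem are_parts_related_spec : Claim_equal_are_parts_related := by
  intro parts1 parts2 _
  exact ports_agree parts1 parts2
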